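-- pv_equiv track=rewrite | github.com/jameswmccarty/sudoku | nurikabe.py | has_hole
-- ===== SOURCE A (Python) =====
-- def has_hole(points):
-- 	xs = { p[0] for p in points }
-- 	ys = { p[1] for p in points }
-- 	for x in range(min(xs),max(xs)+1):
-- 		for y in range(min(ys),max(ys)+1):
-- 			if (x,y) not in points and all( (x+dx,y+dy) in points for dx,dy in ((-1,0),(1,0),(0,1),(0,-1)) ):
-- 				return True
-- 	return False
-- ===== SOURCE B (Python) =====
-- def has_hole(points):
--     pts = set(points)
--     def blocked(c):
--         x, y = c
--         return c not in pts and all((x + dx, y + dy) in pts for dx, dy in ((-1, 0), (1, 0), (0, 1), (0, -1)))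
--     return any(blocked((x + dx, y + dy)) for (x, y) in pts for dx, dy in ((-1, 0), (1, 0), (0, 1), (0, -1)))
-- ===== Notes on version B (the rewrite author's own statement) =====
-- stated objective: faster
-- what changed: Instead of scanning every cell of the bounding box with a linear list-membership test per cell, B builds a set of the points once and tests only the 4 neighbours of each point as hole candidates.
import Mathlib
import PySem

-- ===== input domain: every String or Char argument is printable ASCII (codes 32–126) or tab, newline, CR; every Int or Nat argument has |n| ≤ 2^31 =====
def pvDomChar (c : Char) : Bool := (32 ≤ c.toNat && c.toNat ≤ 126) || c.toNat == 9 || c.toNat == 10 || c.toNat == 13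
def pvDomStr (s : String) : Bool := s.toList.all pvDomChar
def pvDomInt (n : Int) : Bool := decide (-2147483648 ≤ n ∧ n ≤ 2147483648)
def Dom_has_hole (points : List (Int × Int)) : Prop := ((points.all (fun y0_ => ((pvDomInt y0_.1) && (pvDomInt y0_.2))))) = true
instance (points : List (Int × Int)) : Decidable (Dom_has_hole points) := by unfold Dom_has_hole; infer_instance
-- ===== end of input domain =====

-- B replaces A's bounding-box scan (linear list membership per cell) by a one-pass
-- check of the 4 neighbours of each point against a set of the points: faster (asymptotic).

-- ===== PORT A =====
def has_hole (points : List (Int × Int)) : Bool :=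
  let xs : PySem.Set Int := PySem.Set.ofList (points.map (·.1))
  let ys : PySem.Set Int := PySem.Set.ofList (points.map (·.2))
  match PySem.List.min? xs (fun v => v), PySem.List.max? xs (fun v => v),
        PySem.List.min? ys (fun v => v), PySem.List.max? ys (fun v => v) with
  | some xmin, some xmax, some ymin, some ymax =>
      (PySem.List.pyRange xmin (xmax + 1) 1).any (fun x =>
        (PySem.List.pyRange ymin (ymax + 1) 1).any (fun y =>
          !(points.contains (x, y)) &&
          ([((-1 : Int), (0 : Int)), (1, 0), (0, 1), (0, -1)].all
            (fun d => points.contains (x + d.1, y + d.2)))))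
  | _, _, _, _ => false   -- unreachable under Pre_ (Python raises ValueError on empty points)

-- ===== PORT B =====
def pvNbrs : List (Int × Int) := [(-1, 0), (1, 0), (0, 1), (0, -1)]

def pvBlocked (pts : PySem.Set (Int × Int)) (c : Int × Int) : Bool :=
  !(PySem.Set.contains pts c) &&
  pvNbrs.all (fun d => PySem.Set.contains pts (c.1 + d.1, c.2 + d.2))

def has_hole_alt (points : List (Int × Int)) : Bool :=
  let pts : PySem.Set (Int × Int) := PySem.Set.ofList points
  pts.any (fun p => pvNbrs.any (fun d => pvBlocked pts (p.1 + d.1, p.2 + d.2)))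

-- ===== PRECONDITION & SPEC =====
-- Pre_ excludes exactly the empty list, on which Python A raises ValueError (min of an empty set).
def Pre_has_hole (points : List (Int × Int)) : Prop := points ≠ []
instance (points : List (Int × Int)) : Decidable (Pre_has_hole points) := by unfold Pre_has_hole; infer_instance
def pvWitness_has_hole : (List (Int × Int)) := [(0, 0), (2, 2)]

def Spec_has_hole (points : List (Int × Int)) (out : Bool) : Prop := out = has_hole_alt points
instance (points : List (Int × Int)) (out : Bool) : Decidable (Spec_has_hole points out) := by unfold Spec_has_hole; infer_instance

-- ===== CLAIM (what is proved, stated in full; the proofs are below) =====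
def Claim_equal_has_hole : Prop := ∀ (points : List (Int × Int)), Dom_has_hole points → Pre_has_hole points → Spec_has_hole points (has_hole points)

-- ===== LEMMAS AND PROOFS =====

-- The "hole at cell c" predicate both programs test.
def pvHole (points : List (Int × Int)) (c : Int × Int) : Prop :=
  c ∉ points ∧ ∀ d ∈ pvNbrs, (c.1 + d.1, c.2 + d.2) ∈ points

theorem has_hole_alt_iff (points : List (Int × Int)) :
    has_hole_alt points = true ↔ ∃ c, pvHole points c := by
  simp only [has_hole_alt, pvBlocked, List.any_eq_true, List.all_eq_true,
    Bool.and_eq_true, Bool.not_eq_true', PySem.Set.contains_eq_listContains,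
    List.contains_eq_mem, decide_eq_true_eq, decide_eq_false_iff_not,
    PySem.Set.mem_ofList]
  constructor
  · rintro ⟨p, _, d, _, hnot, hall⟩
    exact ⟨(p.1 + d.1, p.2 + d.2), hnot, by simpa using hall⟩
  · rintro ⟨c, hnot, hall⟩
    have h1 : (c.1 - 1, c.2) ∈ points := by
      have := hall (-1, 0) (by simp [pvNbrs])
      simpa using this
    refine ⟨(c.1 - 1, c.2), h1, (1, 0), by simp [pvNbrs], ?_, ?_⟩
    · simpa using hnot
    · intro d hd; have := hall d hd; simpa using this

theorem has_hole_spec_aux (points : List (Int × Int)) (hne : points ≠ []) :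
    has_hole points = has_hole_alt points := by
  obtain ⟨q, hq⟩ := List.exists_mem_of_ne_nil points hne
  have hx : q.1 ∈ PySem.Set.ofList (points.map (·.1)) := by
    rw [PySem.Set.mem_ofList]; exact List.mem_map_of_mem hq
  have hy : q.2 ∈ PySem.Set.ofList (points.map (·.2)) := by
    rw [PySem.Set.mem_ofList]; exact List.mem_map_of_mem hq
  have hxne : PySem.Set.ofList (points.map (·.1)) ≠ [] := List.ne_nil_of_mem hx
  have hyne : PySem.Set.ofList (points.map (·.2)) ≠ [] := List.ne_nil_of_mem hy
  have hminS : ∀ (l : List Int), l ≠ [] → ∃ m, PySem.List.min? l (fun v => v) = some m :=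
    fun l hl => Option.ne_none_iff_exists'.mp
      (fun h => hl ((PySem.List.min?_eq_none_iff l (fun v => v)).mp h))
  have hmaxS : ∀ (l : List Int), l ≠ [] → ∃ m, PySem.List.max? l (fun v => v) = some m :=
    fun l hl => Option.ne_none_iff_exists'.mp
      (fun h => hl ((PySem.List.max?_eq_none_iff l (fun v => v)).mp h))
  obtain ⟨xmin, hxmin⟩ := hminS _ hxne
  obtain ⟨xmax, hxmax⟩ := hmaxS _ hxne
  obtain ⟨ymin, hymin⟩ := hminS _ hyne
  obtain ⟨ymax, hymax⟩ := hmaxS _ hyne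
  have hmemx : ∀ v : Int, v ∈ points.map (·.1) → xmin ≤ v ∧ v ≤ xmax := by
    intro v hv
    rw [← PySem.Set.mem_ofList] at hv
    exact ⟨PySem.List.min?_isMin hxmin v hv, PySem.List.max?_isMax hxmax v hv⟩
  have hmemy : ∀ v : Int, v ∈ points.map (·.2) → ymin ≤ v ∧ v ≤ ymax := by
    intro v hv
    rw [← PySem.Set.mem_ofList] at hv
    exact ⟨PySem.List.min?_isMin hymin v hv, PySem.List.max?_isMax hymax v hv⟩
  rw [Bool.eq_iff_iff, has_hole_alt_iff]
  simp only [has_hole, hxmin, hxmax, hymin, hymax]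
  simp only [List.any_eq_true, List.all_eq_true, Bool.and_eq_true, Bool.not_eq_true',
    List.contains_eq_mem, decide_eq_true_eq, decide_eq_false_iff_not,
    PySem.List.mem_pyRange_one]
  constructor
  · rintro ⟨x, _, y, _, hnot, hall⟩
    exact ⟨(x, y), hnot, fun d hd => hall d hd⟩
  · rintro ⟨c, hnot, hall⟩
    have hl := hall (-1, 0) (by simp [pvNbrs])
    have hr := hall (1, 0) (by simp [pvNbrs])
    have hu := hall (0, 1) (by simp [pvNbrs])
    have hdn := hall (0, -1) (by simp [pvNbrs])
    have hxl := hmemx (c.1 + -1) (List.mem_map_of_mem hl)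
    have hxr := hmemx (c.1 + 1) (List.mem_map_of_mem hr)
    have hyu := hmemy (c.2 + 1) (List.mem_map_of_mem (f := (·.2)) hu)
    have hyd := hmemy (c.2 + -1) (List.mem_map_of_mem (f := (·.2)) hdn)
    refine ⟨c.1, ⟨by omega, by omega⟩, c.2, ⟨by omega, by omega⟩, by simpa using hnot, ?_⟩
    intro d hd; exact hall d hd

-- ===== VERDICT (by name: the statement is the Claim_ definition above) =====
theorem has_hole_spec : Claim_equal_has_hole := by
  intro points _ hpre
  unfold Spec_has_hole
  exact has_hole_spec_aux points hpre
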